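-- pv_equiv track=rewrite | github.com/Burnt-Owl/universal369 | comedy-factory/agents/stock_agent.py | _best_file
-- ===== SOURCE A (Python) =====
-- def _best_file(video: dict) -> dict | None:
--     """Pick the best portrait-orientation video file."""
--     files = sorted(video.get("video_files", []), key=lambda f: f.get("height", 0), reverse=True)
--     # Prefer portrait files >= 1080p
--     for f in files:
--         w, h = f.get("width", 0), f.get("height", 0)
--         if h > w and h >= 1080:
--             return f
--     # Accept any portrait
--     for f in files:
--         if f.get("height", 0) > f.get("width", 0):
--             return f
--     return files[0] if files else None
-- ===== SOURCE B (Python) =====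
-- def _best_file(video: dict) -> dict | None:
--     """Pick the best portrait-orientation video file (no sorting: one filtered max per tier)."""
--     files = video.get("video_files", [])
--     if not files:
--         return None
--     key = lambda f: f.get("height", 0)
--     tier1 = [f for f in files if key(f) > f.get("width", 0) and key(f) >= 1080]
--     if tier1:
--         return max(tier1, key=key)
--     tier2 = [f for f in files if key(f) > f.get("width", 0)]
--     if tier2:
--         return max(tier2, key=key)
--     return max(files, key=key)
-- ===== Notes on version B (the rewrite author's own statement) =====
-- stated objective: alternative
-- what changed: Drops the global descending sort entirely: B does one linear filter+max per tier (Python max returns the first maximal element, matching the stable reverse sort's first hit), instead of sorting all files and scanning the sorted list twice.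
import Mathlib
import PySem

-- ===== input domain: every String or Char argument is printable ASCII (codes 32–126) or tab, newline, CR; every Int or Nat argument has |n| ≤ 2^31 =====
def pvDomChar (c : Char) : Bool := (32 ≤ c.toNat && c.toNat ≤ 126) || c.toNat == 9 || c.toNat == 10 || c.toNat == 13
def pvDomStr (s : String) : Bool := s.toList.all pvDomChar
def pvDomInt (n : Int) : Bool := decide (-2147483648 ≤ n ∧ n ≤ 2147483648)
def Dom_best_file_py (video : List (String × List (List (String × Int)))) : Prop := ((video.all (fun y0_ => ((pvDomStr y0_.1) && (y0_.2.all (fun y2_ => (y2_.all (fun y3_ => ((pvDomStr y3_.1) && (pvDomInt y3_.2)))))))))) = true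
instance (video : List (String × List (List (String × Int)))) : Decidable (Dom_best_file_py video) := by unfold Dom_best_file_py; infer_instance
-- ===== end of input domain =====

-- B drops A's global descending sort and takes one filtered first-maximum per tier; return value only, no mutation.

-- ===== PORT A =====
def best_file_py (video : List (String × List (List (String × Int)))) : Option (List (String × Int)) :=
  let files := PySem.List.sorted (PySem.Dict.getD (PySem.Dict.mk video) "video_files" [])
      (fun f => PySem.Dict.getD (PySem.Dict.mk f) "height" 0) true
  -- first for loop: prefer portrait files >= 1080p (early return = first hit)
  match files.find? (fun f =>
      let w := PySem.Dict.getD (PySem.Dict.mk f) "width" 0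
      let h := PySem.Dict.getD (PySem.Dict.mk f) "height" 0
      decide (h > w ∧ h ≥ 1080)) with
  | some f => some f
  | none =>
    -- second for loop: accept any portrait
    match files.find? (fun f =>
        decide (PySem.Dict.getD (PySem.Dict.mk f) "height" 0 > PySem.Dict.getD (PySem.Dict.mk f) "width" 0)) with
    | some f => some f
    | none =>
      -- files[0] if files else None
      match files with
      | [] => none
      | f :: _ => some f

-- ===== PORT B =====
def best_file_py_alt (video : List (String × List (List (String × Int)))) : Option (List (String × Int)) :=
  let files := PySem.Dict.getD (PySem.Dict.mk video) "video_files" []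
  if files = [] then none
  else
    let key := fun f => PySem.Dict.getD (PySem.Dict.mk f) "height" 0
    let tier1 := files.filter (fun f => decide (key f > PySem.Dict.getD (PySem.Dict.mk f) "width" 0 ∧ key f ≥ 1080))
    if tier1 ≠ [] then PySem.List.max? tier1 key
    else
      let tier2 := files.filter (fun f => decide (key f > PySem.Dict.getD (PySem.Dict.mk f) "width" 0))
      if tier2 ≠ [] then PySem.List.max? tier2 key
      else PySem.List.max? files key

-- ===== PRECONDITION & SPEC =====
def Spec_best_file_py (video : List (String × List (List (String × Int)))) (out : Option (List (String × Int))) : Prop := out = best_file_py_alt video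
instance (video : List (String × List (List (String × Int)))) (out : Option (List (String × Int))) : Decidable (Spec_best_file_py video out) := by unfold Spec_best_file_py; infer_instance

-- ===== CLAIM (what is proved, stated in full; the proofs are below) =====
def Claim_equal_best_file_py : Prop := ∀ (video : List (String × List (List (String × Int)))), Dom_best_file_py video → Spec_best_file_py video (best_file_py video)

-- ===== LEMMAS AND PROOFS =====

-- max? over a list extended by one element: the new element wins only if strictly greater.
theorem max?_concat {α κ : Type} [LinearOrder κ] (l : List α) (x : α) (key : α → κ) :
    PySem.List.max? (l ++ [x]) key =
      match PySem.List.max? l key with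
      | none => some x
      | some m => if key m < key x then some x else some m := by
  simp only [PySem.List.max?, List.foldl_append, List.foldl_cons, List.foldl_nil]
  rfl

-- find? skips an inserted element that fails the predicate
theorem find?_insertBy_neg {α : Type} (bef : α → α → Bool) (p : α → Bool) (x : α)
    (s : List α) (hpx : p x = false) :
    (PySem.List.insertBy bef x s).find? p = s.find? p := by
  induction s with
  | nil => simp [PySem.List.insertBy, List.find?, hpx]
  | cons y ys ih =>
    by_cases h : bef x y = true
    · simp [PySem.List.insertBy, h, List.find?, hpx]
    · cases hpy : p y <;>
        simp [PySem.List.insertBy, h, hpy, ih]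

-- inserting x (predicate true) into a key-descending list: the first hit is x
-- exactly when x's key strictly beats the previous first hit.
theorem find?_insertBy_pos {α κ : Type} [LinearOrder κ] (key : α → κ) (p : α → Bool) (x : α)
    (s : List α) (hs : s.Pairwise (fun a b => key b ≤ key a)) (hpx : p x = true) :
    (PySem.List.insertBy (fun a b => decide (key b < key a)) x s).find? p =
      match s.find? p with
      | none => some x
      | some m => if key m < key x then some x else some m := by
  induction s with
  | nil => simp [PySem.List.insertBy, List.find?, hpx]
  | cons y ys ih =>
    rcases List.pairwise_cons.mp hs with ⟨hy, htail⟩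
    by_cases h : key y < key x
    · -- x goes first; any previous hit m has key m ≤ key y < key x
      have hx : (PySem.List.insertBy (fun a b => decide (key b < key a)) x (y :: ys)) =
          x :: y :: ys := by simp [PySem.List.insertBy, h]
      rw [hx]
      cases hf : (y :: ys).find? p with
      | none => simp [hpx]
      | some m =>
        have hm : m ∈ y :: ys := List.mem_of_find?_eq_some hf
        have hmy : key m ≤ key y := by
          rcases List.mem_cons.mp hm with rfl | hm'
          · exact le_refl _
          · exact hy m hm' 
        simp [hpx, lt_of_le_of_lt hmy h]
    · -- x goes after y
      have hx : (PySem.List.insertBy (fun a b => decide (key b < key a)) x (y :: ys)) =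
          y :: PySem.List.insertBy (fun a b => decide (key b < key a)) x ys := by
        simp [PySem.List.insertBy, h]
      rw [hx]
      cases hpy : p y with
      | true => simp [hpy, h]
      | false => simp [hpy, ih htail]

-- MAIN: first hit of p in the stable descending sort = first maximal element of the filtered list.
theorem find?_sorted_rev_eq_max?_filter {α κ : Type} [LinearOrder κ] (key : α → κ)
    (p : α → Bool) (xs : List α) :
    (PySem.List.sorted xs key true).find? p = PySem.List.max? (xs.filter p) key := by
  induction xs using List.reverseRecOn with
  | nil => simp [PySem.List.sorted, PySem.List.max?]
  | append_singleton l x ih =>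
    have hstep : PySem.List.sorted (l ++ [x]) key true =
        PySem.List.insertBy (fun a b => decide (key b < key a)) x
          (PySem.List.sorted l key true) := by
      rw [PySem.List.sorted_rev_eq_foldl_insertBy, PySem.List.sorted_rev_eq_foldl_insertBy,
        List.foldl_append]
      rfl
    rw [hstep]
    cases hpx : p x with
    | false =>
      rw [find?_insertBy_neg _ _ _ _ hpx, ih]
      simp [List.filter_append, hpx]
    | true =>
      rw [find?_insertBy_pos key p x _ (PySem.List.sorted_pairwise_rev l key) hpx, ih]
      rw [List.filter_append]
      simp only [List.filter, hpx]
      rw [max?_concat]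

theorem find?_true_eq_head? {α : Type} (l : List α) : l.find? (fun _ => true) = l.head? := by
  cases l <;> simp [List.find?]

-- the all-true instance: head of the stable descending sort = first maximal element
theorem head?_sorted_rev_eq_max? {α κ : Type} [LinearOrder κ] (key : α → κ) (xs : List α) :
    (PySem.List.sorted xs key true).head? = PySem.List.max? xs key := by
  have h := find?_sorted_rev_eq_max?_filter key (fun _ => true) xs
  simpa [find?_true_eq_head?] using h

-- ===== VERDICT (by name: the statement is the Claim_ definition above) =====
theorem best_file_py_spec : Claim_equal_best_file_py := by
  intro video _
  unfold Spec_best_file_py best_file_py best_file_py_alt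
  simp only [find?_sorted_rev_eq_max?_filter]
  set p1 : List (String × Int) → Bool := fun f => decide (PySem.Dict.getD (PySem.Dict.mk f) "height" 0 > PySem.Dict.getD (PySem.Dict.mk f) "width" 0 ∧ PySem.Dict.getD (PySem.Dict.mk f) "height" 0 ≥ 1080) with hp1
  set p2 : List (String × Int) → Bool := fun f => decide (PySem.Dict.getD (PySem.Dict.mk f) "height" 0 > PySem.Dict.getD (PySem.Dict.mk f) "width" 0) with hp2
  set key : List (String × Int) → Int := fun f => PySem.Dict.getD (PySem.Dict.mk f) "height" 0 with hkey
  set files : List (List (String × Int)) := PySem.Dict.getD (PySem.Dict.mk video) "video_files" [] with hfiles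
  cases h1 : PySem.List.max? (files.filter p1) key with
  | some f =>
    have ht1 : files.filter p1 ≠ [] := by
      intro h; rw [h] at h1; simp [PySem.List.max?] at h1
    have h0 : files ≠ [] := by
      intro h; rw [h] at ht1; simp at ht1
    simp [h0, ht1]
  | none =>
    have ht1 : files.filter p1 = [] := (PySem.List.max?_eq_none_iff _ _).mp h1
    cases h2 : PySem.List.max? (files.filter p2) key with
    | some f =>
      have ht2 : files.filter p2 ≠ [] := by
        intro h; rw [h] at h2; simp [PySem.List.max?] at h2
      have h0 : files ≠ [] := by
        intro h; rw [h] at ht2; simp at ht2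
      simp [h0, ht1, ht2]
    | none =>
      have ht2 : files.filter p2 = [] := (PySem.List.max?_eq_none_iff _ _).mp h2
      by_cases h0 : files = []
      · simp [h0, PySem.List.sorted]
      · have hmax := head?_sorted_rev_eq_max? key files
        cases hs : PySem.List.sorted files key true with
        | nil =>
          exact absurd ((PySem.List.sorted_eq_nil_iff _ _ _).mp hs) h0
        | cons f t =>
          rw [hs] at hmax
          simp only [List.head?] at hmax
          simp [h0, ht1, ht2, ← hmax]
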